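-- pv_equiv track=rewrite | github.com/mashuangwe/NER | utils.py | get_PER_entity
-- ===== SOURCE A (Python) =====
-- def get_PER_entity(tag_seq, char_seq):
--     PER, temp = [], []
--     for tag, char in zip(tag_seq, char_seq):
--         if tag == 'B_PER' or tag == 'I_PER':
--             temp.append(char)
--         elif temp:
--             PER.append(''.join(temp))
--             temp = []
--     if temp:
--         PER.append(''.join(temp))
--     return PER
-- ===== SOURCE B (Python) =====
-- from itertools import groupby
--
--
-- def get_PER_entity(tag_seq, char_seq):
--     result = []
--     for is_per, group in groupby(zip(tag_seq, char_seq),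
--                                  key=lambda tc: tc[0] in ('B_PER', 'I_PER')):
--         if is_per:
--             result.append(''.join(char for _, char in group))
--     return result
-- ===== Notes on version B (the rewrite author's own statement) =====
-- stated objective: idiomatic
-- what changed: Replaced the explicit temp-buffer accumulate-and-flush loop (with trailing flush) by an itertools.groupby grouping of zip(tag_seq,char_seq) on the is-PER predicate, joining and keeping only the PER groups.
import Mathlib
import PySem

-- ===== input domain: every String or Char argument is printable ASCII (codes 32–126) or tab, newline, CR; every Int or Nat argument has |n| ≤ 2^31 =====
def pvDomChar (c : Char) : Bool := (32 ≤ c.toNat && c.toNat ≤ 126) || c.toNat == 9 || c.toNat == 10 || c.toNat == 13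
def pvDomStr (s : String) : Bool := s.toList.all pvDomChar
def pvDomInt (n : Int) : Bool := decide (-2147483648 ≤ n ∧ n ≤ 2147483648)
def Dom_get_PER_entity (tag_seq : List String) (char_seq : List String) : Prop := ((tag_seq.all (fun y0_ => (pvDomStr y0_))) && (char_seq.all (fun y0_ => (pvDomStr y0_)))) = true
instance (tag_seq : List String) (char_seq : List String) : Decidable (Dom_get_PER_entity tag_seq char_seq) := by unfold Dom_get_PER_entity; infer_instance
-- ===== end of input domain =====

-- ===== PORT A =====
-- A: single pass with a temp buffer, flushed on a non-PER tag and at the end.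
def get_PER_entity (tag_seq : List String) (char_seq : List String) : List String :=
  let st := (tag_seq.zip char_seq).foldl
    (fun (st : List String × List String) tc =>
      if tc.1 == "B_PER" || tc.1 == "I_PER" then (st.1, st.2 ++ [tc.2])
      else if st.2 ≠ [] then (st.1 ++ [String.join st.2], [])
      else st)
    ([], [])
  if st.2 ≠ [] then st.1 ++ [String.join st.2] else st.1

-- ===== PORT B =====
-- B: group zip(tag_seq, char_seq) by the is-PER predicate; join and keep the PER groups.
def pvIsPer (tc : String × String) : Bool := tc.1 == "B_PER" || tc.1 == "I_PER"

def pvGroups : List (String × String) → List String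
  | [] => []
  | tc :: rest =>
    let isPer := pvIsPer tc
    let grp := rest.takeWhile (fun q => pvIsPer q == isPer)
    let rest' := rest.dropWhile (fun q => pvIsPer q == isPer)
    if isPer then String.join (tc.2 :: grp.map Prod.snd) :: pvGroups rest'
    else pvGroups rest'
termination_by l => l.length
decreasing_by
  all_goals exact Nat.lt_of_le_of_lt (List.length_dropWhile_le _ _) (by simp)

def get_PER_entity_alt (tag_seq : List String) (char_seq : List String) : List String :=
  pvGroups (tag_seq.zip char_seq)

-- ===== PRECONDITION & SPEC =====
def Spec_get_PER_entity (tag_seq : List String) (char_seq : List String) (out : List String) : Prop := out = get_PER_entity_alt tag_seq char_seq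
instance (tag_seq : List String) (char_seq : List String) (out : List String) : Decidable (Spec_get_PER_entity tag_seq char_seq out) := by unfold Spec_get_PER_entity; infer_instance

-- ===== CLAIM (what is proved, stated in full; the proofs are below) =====
def Claim_equal_get_PER_entity : Prop := ∀ (tag_seq : List String) (char_seq : List String), Dom_get_PER_entity tag_seq char_seq → Spec_get_PER_entity tag_seq char_seq (get_PER_entity tag_seq char_seq)

-- ===== LEMMAS AND PROOFS =====

-- Reference recursion F: A's loop rewritten as structural recursion over the zipped list,
-- with the pending buffer as an argument.
def pvF (temp : List String) : List (String × String) → List String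
  | [] => if temp ≠ [] then [String.join temp] else []
  | tc :: rest =>
    if pvIsPer tc then pvF (temp ++ [tc.2]) rest
    else if temp ≠ [] then String.join temp :: pvF [] rest
    else pvF [] rest

theorem pvF_eq_fold (l : List (String × String)) : ∀ (PER temp : List String),
    (let st := l.foldl
      (fun (st : List String × List String) tc =>
        if tc.1 == "B_PER" || tc.1 == "I_PER" then (st.1, st.2 ++ [tc.2])
        else if st.2 ≠ [] then (st.1 ++ [String.join st.2], [])
        else st)
      (PER, temp)
     if st.2 ≠ [] then st.1 ++ [String.join st.2] else st.1)
    = PER ++ pvF temp l := by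
  induction l with
  | nil =>
    intro PER temp
    simp only [List.foldl_nil, pvF]
    split_ifs <;> simp
  | cons tc rest ih =>
    intro PER temp
    simp only [List.foldl_cons, pvF, pvIsPer]
    by_cases h1 : (tc.1 == "B_PER" || tc.1 == "I_PER") = true
    · simp only [h1, if_pos]
      exact ih PER (temp ++ [tc.2])
    · have h1' : (tc.1 == "B_PER" || tc.1 == "I_PER") = false := by simpa using h1
      simp only [h1', Bool.false_eq_true, if_false]
      by_cases h2 : temp = []
      · subst h2
        simp only [ne_eq, not_true_eq_false, if_false]
        exact ih PER []
      · simp only [ne_eq, h2, not_false_eq_true, if_true]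
        rw [ih (PER ++ [String.join temp]) []]
        simp

-- pvF over an all-PER prefix accumulates the characters.
theorem pvF_per_prefix (pre : List (String × String)) (h : ∀ p ∈ pre, pvIsPer p = true) :
    ∀ (temp : List String) (rest : List (String × String)),
    pvF temp (pre ++ rest) = pvF (temp ++ pre.map Prod.snd) rest := by
  induction pre with
  | nil => intro temp rest; simp
  | cons q pre ih =>
    intro temp rest
    have hq : pvIsPer q = true := h q (by simp)
    simp only [List.cons_append, pvF, hq, if_true]
    rw [ih (fun p hp => h p (by simp [hp])) (temp ++ [q.2]) rest]
    simp

-- pvF with empty buffer skips an all-non-PER prefix.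
theorem pvF_skip_prefix (pre : List (String × String)) (h : ∀ p ∈ pre, pvIsPer p = false) :
    ∀ (rest : List (String × String)), pvF [] (pre ++ rest) = pvF [] rest := by
  induction pre with
  | nil => intro rest; simp
  | cons q pre ih =>
    intro rest
    have hq : pvIsPer q = false := h q (by simp)
    simp only [List.cons_append, pvF, hq]
    exact ih (fun p hp => h p (by simp [hp])) rest

-- Flushing a nonempty buffer when the next element (if any) is non-PER.
theorem pvF_flush (temp : List String) (ht : temp ≠ []) (l : List (String × String))
    (hl : ∀ q ∈ l.head?, pvIsPer q = false) :
    pvF temp l = String.join temp :: pvF [] l := by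
  cases l with
  | nil => simp [pvF, ht]
  | cons q rest =>
    have hq : pvIsPer q = false := hl q rfl
    simp [pvF, hq, ht]

theorem pvF_eq_pvGroups (n : Nat) : ∀ l : List (String × String), l.length ≤ n →
    pvF [] l = pvGroups l := by
  induction n with
  | zero =>
    intro l hl
    have : l = [] := List.eq_nil_of_length_eq_zero (Nat.le_zero.mp hl)
    subst this; simp [pvF, pvGroups]
  | succ n ih =>
    intro l hl
    cases l with
    | nil => simp [pvF, pvGroups]
    | cons tc rest =>
      by_cases hp : pvIsPer tc = true
      · have hsplit : rest = rest.takeWhile (fun q => pvIsPer q == pvIsPer tc)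
            ++ rest.dropWhile (fun q => pvIsPer q == pvIsPer tc) :=
          (List.takeWhile_append_dropWhile).symm
        have hpre : ∀ p ∈ tc :: rest.takeWhile (fun q => pvIsPer q == pvIsPer tc),
            pvIsPer p = true := by
          intro p hpmem
          rcases List.mem_cons.mp hpmem with h | h
          · subst h; exact hp
          · have := List.mem_takeWhile_imp h
            simpa [hp] using this
        have hhead : ∀ q ∈ (rest.dropWhile (fun q => pvIsPer q == pvIsPer tc)).head?,
            pvIsPer q = false := by
          intro q hq
          have := List.head?_dropWhile_not (fun q => pvIsPer q == pvIsPer tc) rest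
          rcases hmem : (rest.dropWhile (fun q => pvIsPer q == pvIsPer tc)).head? with _ | ⟨q'⟩
          · simp [hmem] at hq
          · rw [hmem] at hq this
            cases hq
            simpa [hp] using this
        calc pvF [] (tc :: rest)
            = pvF [] ((tc :: rest.takeWhile (fun q => pvIsPer q == pvIsPer tc))
                ++ rest.dropWhile (fun q => pvIsPer q == pvIsPer tc)) := by
              rw [List.cons_append, ← hsplit]
          _ = pvF ((tc :: rest.takeWhile (fun q => pvIsPer q == pvIsPer tc)).map Prod.snd)
                (rest.dropWhile (fun q => pvIsPer q == pvIsPer tc)) := by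
              rw [pvF_per_prefix _ hpre]; simp
          _ = String.join (tc.2 :: (rest.takeWhile (fun q => pvIsPer q == pvIsPer tc)).map Prod.snd)
                :: pvF [] (rest.dropWhile (fun q => pvIsPer q == pvIsPer tc)) := by
              rw [pvF_flush _ (by simp) _ hhead]; simp
          _ = pvGroups (tc :: rest) := by
              rw [pvGroups]
              simp only [hp, if_true]
              rw [ih _ (Nat.le_of_lt_succ (Nat.lt_of_le_of_lt
                (List.length_dropWhile_le _ _) (Nat.lt_of_succ_le hl)))]
      · have hp' : pvIsPer tc = false := by simpa using hp
        have hpre : ∀ p ∈ tc :: rest.takeWhile (fun q => pvIsPer q == pvIsPer tc),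
            pvIsPer p = false := by
          intro p hpmem
          rcases List.mem_cons.mp hpmem with h | h
          · subst h; exact hp'
          · have := List.mem_takeWhile_imp h
            simpa [hp'] using this
        have hsplit : rest = rest.takeWhile (fun q => pvIsPer q == pvIsPer tc)
            ++ rest.dropWhile (fun q => pvIsPer q == pvIsPer tc) :=
          (List.takeWhile_append_dropWhile).symm
        calc pvF [] (tc :: rest)
            = pvF [] ((tc :: rest.takeWhile (fun q => pvIsPer q == pvIsPer tc))
                ++ rest.dropWhile (fun q => pvIsPer q == pvIsPer tc)) := by
              rw [List.cons_append, ← hsplit]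
          _ = pvF [] (rest.dropWhile (fun q => pvIsPer q == pvIsPer tc)) :=
              pvF_skip_prefix _ hpre _
          _ = pvGroups (tc :: rest) := by
              rw [pvGroups]
              simp only [hp', Bool.false_eq_true, if_false]
              exact ih _ (Nat.le_of_lt_succ (Nat.lt_of_le_of_lt
                (List.length_dropWhile_le _ _) (Nat.lt_of_succ_le hl)))

-- ===== VERDICT (by name: the statement is the Claim_ definition above) =====
theorem get_PER_entity_spec : Claim_equal_get_PER_entity := by
  intro tag_seq char_seq _
  show get_PER_entity tag_seq char_seq = get_PER_entity_alt tag_seq char_seq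
  unfold get_PER_entity get_PER_entity_alt
  rw [pvF_eq_fold (tag_seq.zip char_seq) [] []]
  simpa using pvF_eq_pvGroups (tag_seq.zip char_seq).length _ (Nat.le_refl _)
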